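-- pv_equiv track=rewrite | github.com/winezer0/infoport | libs/util.py | complex_ports_str_to_port_segment
-- ===== SOURCE A (Python) =====
-- def complex_ports_str_to_port_segment(ports_str):
--     if isinstance(ports_str, list):
--         ports_str = ','.join(ports_str)
--     if isinstance(ports_str, str):
--         ports_str = ports_str.replace(' ', '')
--
--     # # 如果端口格式是 80,1-1000,10001
--     if ',' in ports_str and '-' in ports_str:
--         port_list = ports_str_to_port_list(ports_str)
--         port_list.sort()
--         if len(port_list) > 2000:
--             # 如果端口超过500个,返回最小端口和最大端口范围 1-10001
--             ports_str = '{port_start}-{port_end}'.format(port_start=port_list[0], port_end=port_list[-1])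
--             return ports_str
--         else:
--             # 如果端口不超过500个,返回,号拼接的端口列表
--             ports_str = ','.join(str(port) for port in port_list)
--         return ports_str
--     # 如果端口格式是其他格式,就直接返回
--     else:
--         return ports_str
--
-- def ports_str_to_port_list(ports_str):
--     port_list = []
--     if isinstance(ports_str, list):
--         ports_str = ','.join(ports_str)
--     if isinstance(ports_str, str):
--         ports_str = ports_str.replace(' ', '')
--
--     for port_str in ports_str.split(","):
--         if '-' in port_str:
--             port_start = int(port_str.split("-")[0].strip())
--             port_end = int(port_str.split("-")[1].strip())
--             port_list.extend([port for port in range(port_start, port_end + 1)])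
--         else:
--             port_list.append(int(port_str))
--     return port_list
-- ===== SOURCE B (Python) =====
-- def complex_ports_str_to_port_segment(ports_str):
--     if isinstance(ports_str, list):
--         ports_str = ','.join(ports_str)
--     if isinstance(ports_str, str):
--         ports_str = ports_str.replace(' ', '')
--     if ',' not in ports_str or '-' not in ports_str:
--         return ports_str
--     segs = []
--     for part in ports_str.split(','):
--         if '-' in part:
--             pieces = part.split('-')
--             segs.append((int(pieces[0].strip()), int(pieces[1].strip())))
--         else:
--             p = int(part)
--             segs.append((p, p))
--     nonempty = [(lo, hi) for lo, hi in segs if lo <= hi]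
--     total = sum(hi - lo + 1 for lo, hi in nonempty)
--     if total > 2000:
--         return '{}-{}'.format(min(lo for lo, _ in nonempty),
--                               max(hi for _, hi in nonempty))
--     ports = sorted(p for lo, hi in segs for p in range(lo, hi + 1))
--     return ','.join(str(p) for p in ports)
-- ===== Notes on version B (the rewrite author's own statement) =====
-- stated objective: faster
-- what changed: B parses the comma-separated pieces into (lo,hi) segments once and derives the total port count, minimum and maximum directly from the segments, expanding and sorting the individual ports only when the count is at most 2000; A always expands every range into a full port list and sorts it.
import Mathlib
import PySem

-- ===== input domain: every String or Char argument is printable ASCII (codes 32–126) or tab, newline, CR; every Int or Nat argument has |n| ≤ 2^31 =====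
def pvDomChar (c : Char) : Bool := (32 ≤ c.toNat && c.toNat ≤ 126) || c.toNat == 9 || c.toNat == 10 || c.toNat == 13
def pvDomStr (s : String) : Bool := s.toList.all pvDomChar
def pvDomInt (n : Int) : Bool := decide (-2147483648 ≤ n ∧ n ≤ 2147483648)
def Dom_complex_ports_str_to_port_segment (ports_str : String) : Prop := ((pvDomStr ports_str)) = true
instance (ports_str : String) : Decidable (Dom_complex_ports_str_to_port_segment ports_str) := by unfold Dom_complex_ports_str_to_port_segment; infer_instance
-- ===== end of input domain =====

-- B computes the count, minimum and maximum straight from the comma-separated segments and only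
-- expands + sorts the (≤ 2000) ports when needed; A always expands every segment before sorting.

-- ===== PORT A =====
-- ports_str_to_port_list: the accumulator loop over ports_str.split(','); none = ValueError (excluded by Pre_)
def pvA_loop (parts : List (List Char)) (acc : List Int) : Option (List Int) :=
  match parts with
  | [] => some acc
  | p :: ps =>
    if PySem.Chars.isIn ['-'] p then
      match PySem.Chars.splitOn p ['-'] with
      | p0 :: p1 :: _ =>
        match PySem.Int.ofChars? (PySem.Chars.strip p0), PySem.Int.ofChars? (PySem.Chars.strip p1) with
        | some a, some b => pvA_loop ps (acc ++ PySem.List.pyRange a (b + 1) 1)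
        | _, _ => none
      | _ => none
    else
      match PySem.Int.ofChars? p with
      | some n => pvA_loop ps (acc ++ [n])
      | none => none

def complex_ports_str_to_port_segment (ports_str : String) : String :=
  let s := PySem.Str.replace ports_str " " ""
  if PySem.Str.isIn "," s && PySem.Str.isIn "-" s then
    match pvA_loop (PySem.Chars.splitOn s.toList [',']) [] with
    | some port_list =>
      let sortedl := PySem.List.sorted port_list (fun x => x) false
      if sortedl.length > 2000 then
        String.ofList (PySem.Int.toChars (PySem.List.pyGetD sortedl 0 0) ++
                   '-' :: PySem.Int.toChars (PySem.List.pyGetD sortedl (-1) 0))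
      else
        String.ofList (PySem.Chars.join [','] (sortedl.map PySem.Int.toChars))
    | none => ""   -- Python raises ValueError here; excluded by Pre_
  else
    s

-- ===== PORT B =====
-- the segment-collecting loop of Source B; none = ValueError (excluded by Pre_)
def pvB_segs (parts : List (List Char)) (acc : List (Int × Int)) : Option (List (Int × Int)) :=
  match parts with
  | [] => some acc
  | p :: ps =>
    if PySem.Chars.isIn ['-'] p then
      match PySem.Chars.splitOn p ['-'] with
      | p0 :: p1 :: _ =>
        match PySem.Int.ofChars? (PySem.Chars.strip p0), PySem.Int.ofChars? (PySem.Chars.strip p1) with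
        | some lo, some hi => pvB_segs ps (acc ++ [(lo, hi)])
        | _, _ => none
      | _ => none
    else
      match PySem.Int.ofChars? p with
      | some n => pvB_segs ps (acc ++ [(n, n)])
      | none => none

def complex_ports_str_to_port_segment_alt (ports_str : String) : String :=
  let s := PySem.Str.replace ports_str " " ""
  if !(PySem.Str.isIn "," s) || !(PySem.Str.isIn "-" s) then
    s
  else
    match pvB_segs (PySem.Chars.splitOn s.toList [',']) [] with
    | some segs =>
      let nonempty := segs.filter (fun q => q.1 ≤ q.2)
      let total := (nonempty.map (fun q => q.2 - q.1 + 1)).sum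
      if total > 2000 then
        match PySem.List.min? (nonempty.map Prod.fst) (fun x => x),
              PySem.List.max? (nonempty.map Prod.snd) (fun x => x) with
        | some lo, some hi => String.ofList (PySem.Int.toChars lo ++ '-' :: PySem.Int.toChars hi)
        | _, _ => ""   -- unreachable: total > 2000 forces nonempty ≠ []
      else
        let ports := PySem.List.sorted (segs.flatMap (fun q => PySem.List.pyRange q.1 (q.2 + 1) 1)) (fun x => x) false
        String.ofList (PySem.Chars.join [','] (ports.map PySem.Int.toChars))
    | none => ""   -- Python raises ValueError here; excluded by Pre_
-- ===== PRECONDITION & SPEC =====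
-- every comma-separated piece parses with int() the way A reads it (for 'x-y…' pieces: the first two '-'-separated fields)
def pvPartOK (p : List Char) : Bool :=
  if PySem.Chars.isIn ['-'] p then
    match PySem.Chars.splitOn p ['-'] with
    | p0 :: p1 :: _ =>
      (PySem.Int.ofChars? (PySem.Chars.strip p0)).isSome && (PySem.Int.ofChars? (PySem.Chars.strip p1)).isSome
    | _ => false
  else
    (PySem.Int.ofChars? p).isSome

-- Pre_ excludes exactly the inputs on which Python A raises ValueError (int() failing on some piece); B raises there too.
def Pre_complex_ports_str_to_port_segment (ports_str : String) : Prop :=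
  (PySem.Str.isIn "," (PySem.Str.replace ports_str " " "") &&
   PySem.Str.isIn "-" (PySem.Str.replace ports_str " " "")) = true →
  ∀ p ∈ PySem.Chars.splitOn (PySem.Str.replace ports_str " " "").toList [','], pvPartOK p = true
instance (ports_str : String) : Decidable (Pre_complex_ports_str_to_port_segment ports_str) := by unfold Pre_complex_ports_str_to_port_segment; infer_instance

def pvWitness_complex_ports_str_to_port_segment : String := "80,1-5"

def Spec_complex_ports_str_to_port_segment (ports_str : String) (out : String) : Prop := out = complex_ports_str_to_port_segment_alt ports_str
instance (ports_str : String) (out : String) : Decidable (Spec_complex_ports_str_to_port_segment ports_str out) := by unfold Spec_complex_ports_str_to_port_segment; infer_instance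

-- ===== CLAIM (what is proved, stated in full; the proofs are below) =====
def Claim_equal_complex_ports_str_to_port_segment : Prop := ∀ (ports_str : String), Dom_complex_ports_str_to_port_segment ports_str → Pre_complex_ports_str_to_port_segment ports_str → Spec_complex_ports_str_to_port_segment ports_str (complex_ports_str_to_port_segment ports_str)

-- ===== LEMMAS AND PROOFS =====

def pvRng (q : Int × Int) : List Int := PySem.List.pyRange q.1 (q.2 + 1) 1

def pvSegsOf : List (List Char) → Option (List (Int × Int))
  | [] => some []
  | p :: ps =>
    if PySem.Chars.isIn ['-'] p then
      match PySem.Chars.splitOn p ['-'] with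
      | p0 :: p1 :: _ =>
        match PySem.Int.ofChars? (PySem.Chars.strip p0), PySem.Int.ofChars? (PySem.Chars.strip p1) with
        | some lo, some hi => (pvSegsOf ps).map (fun ss => (lo, hi) :: ss)
        | _, _ => none
      | _ => none
    else
      match PySem.Int.ofChars? p with
      | some n => (pvSegsOf ps).map (fun ss => (n, n) :: ss)
      | none => none

theorem pvB_segs_eq (parts : List (List Char)) (acc : List (Int × Int)) :
    pvB_segs parts acc = (pvSegsOf parts).map (fun ss => acc ++ ss) := by
  induction parts generalizing acc with
  | nil => simp [pvB_segs, pvSegsOf]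
  | cons p ps ih =>
    simp only [pvB_segs, pvSegsOf]
    split
    · rcases h1 : PySem.Chars.splitOn p ['-'] with _ | ⟨p0, _ | ⟨p1, rest⟩⟩ <;> simp only []
      · rfl
      · rfl
      · rcases PySem.Int.ofChars? (PySem.Chars.strip p0) with _ | lo <;>
          rcases PySem.Int.ofChars? (PySem.Chars.strip p1) with _ | hi <;>
          simp only []
        · rfl
        · rfl
        · rfl
        · rw [ih]
          cases pvSegsOf ps <;> simp
    · rcases PySem.Int.ofChars? p with _ | n <;> simp only []
      · rfl
      · rw [ih]
        cases pvSegsOf ps <;> simp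

theorem pvA_loop_eq (parts : List (List Char)) (acc : List Int) :
    pvA_loop parts acc = (pvSegsOf parts).map (fun ss => acc ++ ss.flatMap pvRng) := by
  induction parts generalizing acc with
  | nil => simp [pvA_loop, pvSegsOf]
  | cons p ps ih =>
    simp only [pvA_loop, pvSegsOf]
    split
    · rcases h1 : PySem.Chars.splitOn p ['-'] with _ | ⟨p0, _ | ⟨p1, rest⟩⟩ <;> simp only []
      · rfl
      · rfl
      · rcases PySem.Int.ofChars? (PySem.Chars.strip p0) with _ | lo <;>
          rcases PySem.Int.ofChars? (PySem.Chars.strip p1) with _ | hi <;>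
          simp only []
        · rfl
        · rfl
        · rfl
        · rw [ih]
          cases pvSegsOf ps <;> simp [pvRng]
    · rcases PySem.Int.ofChars? p with _ | n <;> simp only []
      · rfl
      · rw [ih]
        cases pvSegsOf ps <;> simp [pvRng, PySem.List.pyRange_one_singleton]

theorem pvSegsOf_isSome (parts : List (List Char)) (h : ∀ p ∈ parts, pvPartOK p = true) :
    (pvSegsOf parts).isSome := by
  induction parts with
  | nil => simp [pvSegsOf]
  | cons p ps ih =>
    have hp := h p (by simp)
    have hps : (pvSegsOf ps).isSome := ih (fun q hq => h q (by simp [hq]))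
    simp only [pvSegsOf]
    unfold pvPartOK at hp
    split at hp
    · rename_i hin
      simp only [hin, if_true]
      rcases h1 : PySem.Chars.splitOn p ['-'] with _ | ⟨p0, _ | ⟨p1, rest⟩⟩ <;> rw [h1] at hp
      · exact absurd hp (by simp)
      · exact absurd hp (by simp)
      · simp only [Bool.and_eq_true, Option.isSome_iff_exists] at hp
        obtain ⟨⟨lo, hlo⟩, ⟨hi, hhi⟩⟩ := hp
        simp [hlo, hhi, Option.isSome_map, hps]
    · rename_i hin
      simp only [Bool.not_eq_true] at hin
      simp only [hin, Bool.false_eq_true, if_false]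
      rcases hp' : PySem.Int.ofChars? p with _ | n
      · rw [hp'] at hp; simp at hp
      · simpa using hps

-- the expanded port list has as many elements as the nonempty segments say
theorem pv_len_flatMap (ss : List (Int × Int)) :
    ((ss.flatMap pvRng).length : Int)
      = ((ss.filter (fun q => decide (q.1 ≤ q.2))).map (fun q => q.2 - q.1 + 1)).sum := by
  induction ss with
  | nil => simp
  | cons q ss ih =>
    rcases q with ⟨lo, hi⟩
    have hlen : (((pvRng (lo, hi)).length : Nat) : Int) = if lo ≤ hi then hi - lo + 1 else 0 := by
      simp only [pvRng, PySem.List.length_pyRange_one]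
      split <;> omega
    rw [List.flatMap_cons, List.length_append, Nat.cast_add, ih, hlen]
    by_cases hq : lo ≤ hi <;> simp [hq]
theorem pv_mem_flatMap (ss : List (Int × Int)) (x : Int) :
    x ∈ ss.flatMap pvRng ↔ ∃ q ∈ ss, q.1 ≤ x ∧ x ≤ q.2 := by
  simp only [List.mem_flatMap, pvRng, PySem.List.mem_pyRange_one]
  constructor
  · rintro ⟨q, hq, h1, h2⟩; exact ⟨q, hq, h1, by omega⟩
  · rintro ⟨q, hq, h1, h2⟩; exact ⟨q, hq, h1, by omega⟩

theorem pv_min_eq (ss : List (Int × Int)) (m : Int) (t : List Int)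
    (hs : PySem.List.sorted (ss.flatMap pvRng) (fun x => x) false = m :: t) :
    PySem.List.min? ((ss.filter (fun q => decide (q.1 ≤ q.2))).map Prod.fst) (fun x => x) = some m := by
  have hmem : m ∈ ss.flatMap pvRng := by
    rw [← PySem.List.mem_sorted _ (fun x => x) false, hs]; simp
  obtain ⟨q, hq, hq1, hq2⟩ := (pv_mem_flatMap ss m).1 hmem
  have hqf : q.1 ∈ (ss.filter (fun q => decide (q.1 ≤ q.2))).map Prod.fst := by
    simp only [List.mem_map, List.mem_filter]
    exact ⟨q, ⟨hq, by simp; omega⟩, rfl⟩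
  rcases hv : PySem.List.min? ((ss.filter (fun q => decide (q.1 ≤ q.2))).map Prod.fst) (fun x => x)
    with _ | v
  · rw [PySem.List.min?_eq_none_iff] at hv
    rw [hv] at hqf; simp at hqf
  · have hvmem := PySem.List.min?_mem hv
    have hvmin := PySem.List.min?_isMin hv
    have h1 : v ≤ m := le_trans (hvmin q.1 hqf) hq1
    obtain ⟨r, hr, hrv⟩ := List.mem_map.1 hvmem
    obtain ⟨hrss, hrle⟩ := List.mem_filter.1 hr
    have hvflat : v ∈ ss.flatMap pvRng := by
      rw [pv_mem_flatMap]
      exact ⟨r, hrss, by rw [← hrv]; exact ⟨le_refl _, by simpa using hrle⟩⟩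
    have h2 : m ≤ v := PySem.List.key_head_sorted_le _ (fun x => x) hs v hvflat
    rw [hv, le_antisymm h1 h2]

theorem pv_last_is_max (xs : List Int) (z : Int)
    (hz : (PySem.List.sorted xs (fun x => x) false).getLast? = some z)
    (y : Int) (hy : y ∈ xs) : y ≤ z := by
  rw [← PySem.List.mem_sorted _ (fun x => x) false] at hy
  obtain ⟨p, hp, hyp⟩ := List.mem_iff_getElem.1 hy
  have hne : PySem.List.sorted xs (fun x => x) false ≠ [] := by
    intro h; rw [h] at hz; simp at hz
  rw [List.getLast?_eq_some_getLast hne, Option.some.injEq] at hz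
  rw [← hz, List.getLast_eq_getElem]
  have := PySem.List.key_sorted_getElem_mono xs (fun x => x)
    (p := p) (q := (PySem.List.sorted xs (fun x => x) false).length - 1) (by omega) (by omega)
  simpa [hyp] using this

theorem pv_max_eq (ss : List (Int × Int)) (m : Int) (t : List Int)
    (hs : PySem.List.sorted (ss.flatMap pvRng) (fun x => x) false = m :: t) :
    PySem.List.max? ((ss.filter (fun q => decide (q.1 ≤ q.2))).map Prod.snd) (fun x => x)
      = some ((m :: t).getLast (by simp)) := by
  have hz : (PySem.List.sorted (ss.flatMap pvRng) (fun x => x) false).getLast?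
      = some ((m :: t).getLast (by simp)) := by
    rw [hs]; exact List.getLast?_eq_some_getLast (by simp)
  have hlast_mem : (m :: t).getLast (by simp) ∈ ss.flatMap pvRng := by
    rw [← PySem.List.mem_sorted _ (fun x => x) false, hs]
    exact List.getLast_mem _
  obtain ⟨q, hq, hq1, hq2⟩ := (pv_mem_flatMap ss _).1 hlast_mem
  have hqf : q.2 ∈ (ss.filter (fun q => decide (q.1 ≤ q.2))).map Prod.snd := by
    simp only [List.mem_map, List.mem_filter]
    exact ⟨q, ⟨hq, by simp; omega⟩, rfl⟩
  rcases hv : PySem.List.max? ((ss.filter (fun q => decide (q.1 ≤ q.2))).map Prod.snd) (fun x => x)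
    with _ | v
  · rw [PySem.List.max?_eq_none_iff] at hv
    rw [hv] at hqf; simp at hqf
  · have hvmem := PySem.List.max?_mem hv
    have hvmax := PySem.List.max?_isMax hv
    have h1 : (m :: t).getLast (by simp) ≤ v := le_trans hq2 (hvmax q.2 hqf)
    obtain ⟨r, hr, hrv⟩ := List.mem_map.1 hvmem
    obtain ⟨hrss, hrle⟩ := List.mem_filter.1 hr
    have hvflat : v ∈ ss.flatMap pvRng := by
      rw [pv_mem_flatMap]
      exact ⟨r, hrss, by rw [← hrv]; exact ⟨by simpa using hrle, le_refl _⟩⟩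
    have h2 : v ≤ (m :: t).getLast (by simp) := pv_last_is_max _ _ hz v hvflat
    rw [hv, le_antisymm h1 h2]

-- ===== VERDICT (by name: the statement is the Claim_ definition above) =====
theorem complex_ports_str_to_port_segment_spec : Claim_equal_complex_ports_str_to_port_segment := by
  intro ports_str _ hpre
  unfold Spec_complex_ports_str_to_port_segment
  unfold complex_ports_str_to_port_segment complex_ports_str_to_port_segment_alt
  simp only []
  by_cases hc : (PySem.Str.isIn "," (PySem.Str.replace ports_str " " "") &&
      PySem.Str.isIn "-" (PySem.Str.replace ports_str " " "")) = true
  case neg =>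
    rw [if_neg hc]
    have hc' : ¬ (PySem.Str.isIn "," (PySem.Str.replace ports_str " " "") = true ∧
        PySem.Str.isIn "-" (PySem.Str.replace ports_str " " "") = true) := by
      rw [← Bool.and_eq_true]; exact hc
    rcases not_and_or.mp hc' with h | h <;> simp only [Bool.not_eq_true] at h <;>
      rw [if_pos (show _ = true by rw [h]; simp)]
  case pos =>
    rw [if_pos hc]
    obtain ⟨h1, h2⟩ := Bool.and_eq_true _ _ |>.mp hc
    rw [h1, h2]
    simp only [Bool.not_true, Bool.or_self]
    rw [if_neg (show ¬ (false = true) by simp)]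
    have hparse := hpre hc
    have hsome := pvSegsOf_isSome _ hparse
    rcases hss : pvSegsOf (PySem.Chars.splitOn (PySem.Str.replace ports_str " " "").toList [','])
      with _ | ss
    · rw [hss] at hsome; simp at hsome
    · rw [pvA_loop_eq, pvB_segs_eq, hss]
      simp only [Option.map_some, List.nil_append]
      set L := ss.flatMap pvRng with hL
      have hlen : ((L.length : Int))
          = ((ss.filter (fun q => decide (q.1 ≤ q.2))).map (fun q => q.2 - q.1 + 1)).sum :=
        pv_len_flatMap ss
      have hlensort : (PySem.List.sorted L (fun x => x) false).length = L.length :=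
        PySem.List.length_sorted L (fun x => x) false
      by_cases hbig :
          ((ss.filter (fun q => decide (q.1 ≤ q.2))).map (fun q => q.2 - q.1 + 1)).sum > 2000
      · rw [if_pos hbig, if_pos (by omega)]
        have hne : (PySem.List.sorted L (fun x => x) false).length > 2000 := by omega
        rcases hsrt : PySem.List.sorted L (fun x => x) false with _ | ⟨m, t⟩
        · rw [hsrt] at hne; simp at hne
        · rw [pv_min_eq ss m t hsrt, pv_max_eq ss m t hsrt]
          rw [PySem.List.pyGetD_neg_one (m :: t) 0 (by simp), PySem.List.pyGetD_zero_cons]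
      · rw [if_neg hbig, if_neg (by omega)]
        rfl
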